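-- pv_equiv track=rewrite | github.com/rasoulnorouzi/JointLearning | src/jointlearning/inference_test.py | _correct_bio_word_sequence
-- ===== SOURCE A (Python) =====
-- from typing import Dict, Tuple, Optional, Any, List
--
-- def _correct_bio_word_sequence(word_tags_list: List[str]) -> List[str]:
--     corrected_tags = []
--     for i, tag in enumerate(word_tags_list):
--         if tag.startswith("I-"):
--             entity_type = tag.split("-", 1)[1]
--             if i == 0: corrected_tags.append(f"B-{entity_type}")
--             else:
--                 prev_tag = corrected_tags[-1]
--                 if prev_tag == "O" or (prev_tag.startswith(("B-","I-")) and prev_tag[2:] != entity_type):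
--                     corrected_tags.append(f"B-{entity_type}")
--                 else: corrected_tags.append(tag)
--         else: corrected_tags.append(tag)
--     return corrected_tags
-- ===== SOURCE B (Python) =====
-- from typing import List
--
--
-- def _correct_bio_word_sequence(word_tags_list: List[str]) -> List[str]:
--     # Stateless: each output tag is computed from the ORIGINAL previous tag
--     # (correction only flips I- to B-, never changing a tag's type or O-ness,
--     # so the guard gives the same answer on the original previous tag).
--     def fix(prev, tag):
--         if not tag.startswith("I-"):
--             return tag
--         if prev is None or prev == "O" or (
--             (prev.startswith("B-") or prev.startswith("I-")) and prev[2:] != tag[2:]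
--         ):
--             return "B-" + tag[2:]
--         return tag
--
--     prevs = [None] + word_tags_list[:-1]
--     return [fix(p, t) for p, t in zip(prevs, word_tags_list)]
-- ===== Notes on version B (the rewrite author's own statement) =====
-- stated objective: alternative
-- what changed: A builds the output with an accumulator and decides each I- tag by reading corrected_tags[-1]; B is a stateless zip/list-comprehension that decides each tag from the ORIGINAL previous input tag (valid because correction only flips I- to B-, preserving each tag's type and O-ness).
import Mathlib
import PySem

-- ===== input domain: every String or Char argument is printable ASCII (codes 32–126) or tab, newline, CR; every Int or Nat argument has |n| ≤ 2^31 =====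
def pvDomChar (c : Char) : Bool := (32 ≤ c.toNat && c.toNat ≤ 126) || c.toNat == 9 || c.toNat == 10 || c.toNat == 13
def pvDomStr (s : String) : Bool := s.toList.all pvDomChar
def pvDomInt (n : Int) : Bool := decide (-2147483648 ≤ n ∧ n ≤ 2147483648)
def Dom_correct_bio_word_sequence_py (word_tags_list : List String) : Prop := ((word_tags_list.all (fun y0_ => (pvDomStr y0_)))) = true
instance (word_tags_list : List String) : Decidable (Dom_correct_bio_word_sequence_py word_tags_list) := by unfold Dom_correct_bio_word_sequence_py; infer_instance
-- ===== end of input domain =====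

-- B recomputes each tag independently from the ORIGINAL previous tag (a stateless
-- zip over the input) instead of A's accumulator that reads corrected_tags[-1];
-- objective: alternative decomposition, same cost.

-- ===== PORT A =====
-- tag.split("-", 1)[1]
def pvEntityA (tag : String) : String :=
  match PySem.Str.splitMax? tag "-" 1 with
  | some parts => (PySem.List.pyGet? parts 1).getD ""  -- [1]; IndexError unreachable: tag starts with "I-", so it splits
  | none => ""                                          -- unreachable: the separator "-" is nonempty

-- the body of A's for-loop (corrected_tags is the accumulator)
def pvStepA (corrected_tags : List String) (p : Int × String) : List String :=
  let i := p.1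
  let tag := p.2
  if PySem.Str.startswith tag "I-" then
    let entity_type := pvEntityA tag
    if i == 0 then corrected_tags ++ ["B-" ++ entity_type]
    else
      -- corrected_tags[-1]; the default is unreachable: i ≠ 0 means the accumulator is nonempty
      let prev_tag := (PySem.List.pyGet? corrected_tags (-1)).getD ""
      if prev_tag == "O" || ((PySem.Str.startswith prev_tag "B-" || PySem.Str.startswith prev_tag "I-")
          && (PySem.Str.slice prev_tag (some 2) none != entity_type)) then
        corrected_tags ++ ["B-" ++ entity_type]
      else corrected_tags ++ [tag]
  else corrected_tags ++ [tag]

def correct_bio_word_sequence_py (word_tags_list : List String) : List String :=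
  (PySem.List.enumerate word_tags_list 0).foldl pvStepA []

-- ===== PORT B =====
-- 'prev is None or prev == "O" or ((prev.startswith("B-") or prev.startswith("I-")) and prev[2:] != tag[2:])'
def pvNeedsB (prev? : Option String) (tag : String) : Bool :=
  match prev? with
  | none => true
  | some prev => prev == "O" || ((PySem.Str.startswith prev "B-" || PySem.Str.startswith prev "I-")
      && (PySem.Str.slice prev (some 2) none != PySem.Str.slice tag (some 2) none))

def pvFixTag (prev? : Option String) (tag : String) : String :=
  if !(PySem.Str.startswith tag "I-") then tag
  else if pvNeedsB prev? tag then "B-" ++ PySem.Str.slice tag (some 2) none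
  else tag

def correct_bio_word_sequence_py_alt (word_tags_list : List String) : List String :=
  -- prevs = [None] + word_tags_list[:-1]; zip truncates to the input's length
  List.zipWith pvFixTag (none :: (PySem.List.slice word_tags_list none (some (-1))).map some) word_tags_list

-- ===== PRECONDITION & SPEC =====
def Spec_correct_bio_word_sequence_py (word_tags_list : List String) (out : List String) : Prop := out = correct_bio_word_sequence_py_alt word_tags_list
instance (word_tags_list : List String) (out : List String) : Decidable (Spec_correct_bio_word_sequence_py word_tags_list out) := by unfold Spec_correct_bio_word_sequence_py; infer_instance

-- ===== CLAIM (what is proved, stated in full; the proofs are below) =====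
def Claim_equal_correct_bio_word_sequence_py : Prop := ∀ (word_tags_list : List String), Dom_correct_bio_word_sequence_py word_tags_list → Spec_correct_bio_word_sequence_py word_tags_list (correct_bio_word_sequence_py word_tags_list)

-- ===== LEMMAS AND PROOFS =====

-- a corrected tag q arising from original tag po: either unchanged, or I-x flipped to B-x
def pvRel (po q : String) : Prop :=
  q = po ∨ ∃ r, po.toList = 'I' :: '-' :: r ∧ q.toList = 'B' :: '-' :: r

lemma pv_startswith_I (t : String) :
    PySem.Str.startswith t "I-" = true ↔ ∃ r, t.toList = 'I' :: '-' :: r := by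
  rw [PySem.Str.startswith_eq, PySem.Chars.startswith_iff]
  constructor
  · rintro ⟨r, hr⟩; exact ⟨r, hr.symm⟩
  · rintro ⟨r, hr⟩; exact ⟨r, hr.symm⟩

lemma pv_go0 (sep : List Char) (fuel : Nat) (l cur : List Char) (acc : List (List Char)) :
    PySem.Chars.splitOnMax.go sep fuel 0 l cur acc = ((cur.reverse ++ l) :: acc).reverse := by
  cases fuel <;> cases l <;> simp [PySem.Chars.splitOnMax.go]

lemma pv_split_entity (r : List Char) :
    PySem.Chars.splitOnMax ('I' :: '-' :: r) ['-'] 1 = [['I'], r] := by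
  simp only [PySem.Chars.splitOnMax]
  norm_num
  show PySem.Chars.splitOnMax.go ['-'] (r.length + 1 + 1 + 1) 1 ('I' :: '-' :: r) [] [] = [['I'], r]
  simp [PySem.Chars.splitOnMax.go, List.isPrefixOf, pv_go0]

lemma pv_entityA (tag : String) (r : List Char) (h : tag.toList = 'I' :: '-' :: r) :
    pvEntityA tag = String.ofList r := by
  unfold pvEntityA PySem.Str.splitMax? PySem.Chars.splitMax?
  simp [h, pv_split_entity, PySem.List.pyGet?, PySem.List.pyIdx?]

lemma pv_slice2 (tag : String) (r : List Char) (h : tag.toList = 'I' :: '-' :: r) :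
    PySem.Str.slice tag (some 2) none = String.ofList r := by
  rw [← String.toList_inj, String.toList_ofList]
  rw [PySem.Str.toList_slice, h, PySem.Chars.slice_eq_listSlice]
  simp [PySem.List.slice, PySem.List.clampIdx]

lemma pv_slice2B (q : String) (r : List Char) (h : q.toList = 'B' :: '-' :: r) :
    PySem.Str.slice q (some 2) none = String.ofList r := by
  rw [← String.toList_inj, String.toList_ofList]
  rw [PySem.Str.toList_slice, h, PySem.Chars.slice_eq_listSlice]
  simp [PySem.List.slice, PySem.List.clampIdx]

-- A's inner guard, as a function of the previous tag and the entity string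
def pvGuard (prev e : String) : Bool :=
  prev == "O" || ((PySem.Str.startswith prev "B-" || PySem.Str.startswith prev "I-")
      && (PySem.Str.slice prev (some 2) none != e))

lemma pv_guard_transfer (po q e : String) (h : pvRel po q) : pvGuard q e = pvGuard po e := by
  rcases h with h | ⟨r, hpo, hq⟩
  · rw [h]
  · have hq0 : (q == "O") = false := by
      simp only [beq_eq_false_iff_ne]
      intro hcon; rw [hcon] at hq; simp at hq
    have hp0 : (po == "O") = false := by
      simp only [beq_eq_false_iff_ne]
      intro hcon; rw [hcon] at hpo; simp at hpo
    have hqB : PySem.Str.startswith q "B-" = true := by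
      rw [PySem.Str.startswith_eq, PySem.Chars.startswith_iff, hq]
      exact ⟨r, rfl⟩
    have hpI : PySem.Str.startswith po "I-" = true := (pv_startswith_I po).mpr ⟨r, hpo⟩
    unfold pvGuard
    rw [hq0, hp0, hqB, hpI, pv_slice2 po r hpo, pv_slice2B q r hq]
    simp

lemma pv_toList_B_append (r : List Char) :
    ("B-" ++ String.ofList r).toList = 'B' :: '-' :: r := by
  simp

-- pvStepA at a nonzero index, with a nonempty accumulator, is pvFixTag on the original prev
lemma pv_step_eq (acc₀ : List String) (q po x : String) (n : Int) (hn : 1 ≤ n)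
    (hrel : pvRel po q) :
    pvStepA (acc₀ ++ [q]) (n, x) = (acc₀ ++ [q]) ++ [pvFixTag (some po) x] := by
  have hn0 : ((n : Int) == 0) = false := by simp only [beq_eq_false_iff_ne]; omega
  unfold pvStepA pvFixTag
  simp only
  cases hsw : PySem.Str.startswith x "I-" with
  | false => simp
  | true =>
    obtain ⟨r, hx⟩ := (pv_startswith_I x).mp hsw
    simp only [hn0, if_true, Bool.not_true, Bool.false_eq_true, if_false,
      PySem.List.pyGet?_neg_one_append_singleton, Option.getD_some]
    have hguard : (q == "O" || ((PySem.Str.startswith q "B-" || PySem.Str.startswith q "I-")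
        && (PySem.Str.slice q (some 2) none != pvEntityA x)))
        = pvNeedsB (some po) x := by
      have := pv_guard_transfer po q (String.ofList r) hrel
      unfold pvGuard at this
      unfold pvNeedsB
      rw [pv_entityA x r hx, pv_slice2 x r hx, this]
    rw [hguard]
    split
    · rw [pv_entityA x r hx, pv_slice2 x r hx]
    · rfl

lemma pv_rel_fix (x : String) (p? : Option String) : pvRel x (pvFixTag p? x) := by
  unfold pvFixTag
  cases hsw : PySem.Str.startswith x "I-" with
  | false => simp [pvRel]
  | true =>
    obtain ⟨r, hx⟩ := (pv_startswith_I x).mp hsw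
    simp only [Bool.not_true, Bool.false_eq_true, if_false]
    cases hb : pvNeedsB p? x with
    | false => rw [if_neg (by simp)]; left; rfl
    | true =>
      rw [if_pos (by simp)]
      right; exact ⟨r, hx, by rw [pv_slice2 x r hx]; exact pv_toList_B_append r⟩

-- the loop from index n ≥ 1 on, with accumulator acc₀ ++ [q] and pvRel po q
lemma pv_loop (xs : List String) : ∀ (n : Int) (acc₀ : List String) (q po : String),
    1 ≤ n → pvRel po q →
    (PySem.List.enumerate xs n).foldl pvStepA (acc₀ ++ [q])
      = (acc₀ ++ [q]) ++ List.zipWith pvFixTag (some po :: xs.map some) xs := by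
  induction xs with
  | nil => intro n acc₀ q po _ _; simp [PySem.List.enumerate_nil]
  | cons x xs ih =>
    intro n acc₀ q po hn hrel
    rw [PySem.List.enumerate_cons, List.foldl_cons, pv_step_eq acc₀ q po x n hn hrel]
    have := ih (n + 1) (acc₀ ++ [q]) (pvFixTag (some po) x) x (by omega)
      (pv_rel_fix x (some po))
    rw [this]
    simp

-- B's [None] + tags[:-1] may be replaced by None :: tags (zip truncates)
lemma pv_zw_trunc (xs : List String) : ∀ (x : String),
    List.zipWith pvFixTag ((x :: xs).dropLast.map some) xs
      = List.zipWith pvFixTag (some x :: xs.map some) xs := by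
  induction xs with
  | nil => intro x; rfl
  | cons b t ih =>
    intro x
    rw [List.dropLast_cons₂, List.map_cons, List.zipWith_cons_cons, ih b]
    rfl

-- ===== VERDICT (by name: the statement is the Claim_ definition above) =====
theorem correct_bio_word_sequence_py_spec : Claim_equal_correct_bio_word_sequence_py := by
  intro l _
  show correct_bio_word_sequence_py l = correct_bio_word_sequence_py_alt l
  unfold correct_bio_word_sequence_py correct_bio_word_sequence_py_alt
  rw [PySem.List.slice_to_neg_one]
  cases l with
  | nil => rfl
  | cons x xs =>
    have hstep0 : pvStepA [] (0, x) = [pvFixTag none x] := by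
      unfold pvStepA pvFixTag
      dsimp only
      cases hsw : PySem.Str.startswith x "I-" with
      | false => simp
      | true =>
        obtain ⟨r, hx⟩ := (pv_startswith_I x).mp hsw
        simp [pvNeedsB, pv_entityA x r hx, pv_slice2 x r hx]
    rw [PySem.List.enumerate_cons, List.foldl_cons, hstep0]
    simp only [zero_add]
    have := pv_loop xs 1 [] (pvFixTag none x) x (by omega) (pv_rel_fix x none)
    simp only [List.nil_append] at this
    rw [this, List.zipWith_cons_cons, pv_zw_trunc xs x]
    rfl
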